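-- pv_equiv track=rewrite | github.com/CampiottiAI/pytimelog | pytimelog/tui.py | _shrink_to_total
-- ===== SOURCE A (Python) =====
-- from typing import List, Tuple
--
-- def _shrink_to_total(values: List[int], total: int) -> List[int]:
--     if total <= 0:
--         return [0] * len(values)
--     result = values[:]
--     while sum(result) > total and any(v > 1 for v in result):
--         for idx in range(len(result)):
--             if sum(result) <= total:
--                 break
--             if result[idx] > 1:
--                 result[idx] -= 1
--     return result
-- ===== SOURCE B (Python) =====
-- def _shrink_to_total(values, total):
--     # Closed-form round-robin: R complete rounds found by binary search on the
--     # removal function, remainder applied to the first eligible items in order.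
--     if total <= 0:
--         return [0] * len(values)
--     excess = sum(values) - total
--     if excess <= 0:
--         return list(values)
--     caps = [v - 1 if v > 1 else 0 for v in values]
--     capsum = sum(caps)
--     budget = excess if excess <= capsum else capsum
--
--     def removed(r):  # amount removed after r complete rounds
--         return sum(c if c < r else r for c in caps)
--
--     lo, hi = 0, max(caps, default=0)
--     while lo < hi:  # R = greatest r with removed(r) <= budget
--         mid = (lo + hi + 1) // 2
--         if removed(mid) <= budget:
--             lo = mid
--         else:
--             hi = mid - 1
--     rounds = lo
--     rem = budget - removed(rounds)
--     out = []
--     for v, c in zip(values, caps):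
--         take = c if c < rounds else rounds
--         if c > rounds and rem > 0:
--             take += 1
--             rem -= 1
--         out.append(v - take)
--     return out
-- ===== Notes on version B (the rewrite author's own statement) =====
-- stated objective: alternative
-- what changed: A repeatedly sweeps the list decrementing eligible entries by 1 until the sum fits; B computes the result in closed form: per-element capacities, a binary search for the number of complete round-robin rounds, and one pass applying the remainder to the first eligible entries.
import Mathlib
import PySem

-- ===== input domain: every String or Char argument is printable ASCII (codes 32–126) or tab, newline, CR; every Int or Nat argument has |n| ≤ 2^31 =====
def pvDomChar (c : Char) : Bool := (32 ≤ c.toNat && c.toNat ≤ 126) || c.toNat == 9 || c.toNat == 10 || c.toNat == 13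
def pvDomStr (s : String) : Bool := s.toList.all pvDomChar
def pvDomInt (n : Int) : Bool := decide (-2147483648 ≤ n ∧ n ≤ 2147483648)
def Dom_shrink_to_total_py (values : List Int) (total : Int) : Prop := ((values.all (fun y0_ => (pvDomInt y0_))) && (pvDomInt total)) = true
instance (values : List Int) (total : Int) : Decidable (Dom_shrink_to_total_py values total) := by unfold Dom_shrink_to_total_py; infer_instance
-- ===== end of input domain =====

-- B replaces A's repeated decrement-by-one sweeps with a closed-form round-robin
-- distribution (binary search for the number of complete rounds); objective: alternative.

-- ===== PORT A =====
-- one body of A's inner `for idx in range(len(result))` loop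
def passStep (total : Int) (res : List Int) (idx : Nat) : List Int :=
  if res.sum ≤ total then res            -- `break`: once the sum fits, the rest of the pass is a no-op
  else if 1 < res.getD idx 0 then res.set idx (res.getD idx 0 - 1) else res

-- A's inner for-loop (one pass over all indices)
def passA (total : Int) (res : List Int) : List Int :=
  (List.range res.length).foldl (passStep total) res

-- proof device needed for the termination of A's while-loop:
-- `decFirst k l` decrements the first k elements of l that are > 1
def decFirst (k : Int) : List Int → List Int
  | [] => []
  | v :: rest => if 1 < v ∧ 0 < k then (v - 1) :: decFirst (k - 1) rest
                 else v :: decFirst k rest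

theorem decFirst_nonpos (l : List Int) (k : Int) (hk : k ≤ 0) : decFirst k l = l := by
  induction l generalizing k with
  | nil => rfl
  | cons v rest ih =>
    simp only [decFirst]
    rw [if_neg (by omega : ¬(1 < v ∧ 0 < k))]
    rw [ih k hk]

theorem pass_skip (idxs : List Nat) (total : Int) (res : List Int) (h : res.sum ≤ total) :
    idxs.foldl (passStep total) res = res := by
  induction idxs with
  | nil => rfl
  | cons i is ih => simp only [List.foldl_cons, passStep, if_pos h]; exact ih

theorem getD_mid (pre : List Int) (v : Int) (rest : List Int) :
    (pre ++ v :: rest).getD pre.length 0 = v := by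
  induction pre with
  | nil => rfl
  | cons p ps ih => simpa using ih

theorem set_mid (pre : List Int) (v x : Int) (rest : List Int) :
    (pre ++ v :: rest).set pre.length x = pre ++ x :: rest := by
  induction pre with
  | nil => rfl
  | cons p ps ih => simpa using ih

theorem pass_go (suf : List Int) : ∀ (pre : List Int) (total : Int),
    (List.range' pre.length suf.length).foldl (passStep total) (pre ++ suf)
      = pre ++ decFirst ((pre ++ suf).sum - total) suf := by
  induction suf with
  | nil => intro pre total; simp [decFirst]
  | cons v rest ih =>
    intro pre total
    simp only [List.length_cons]
    rw [List.range'_succ, List.foldl_cons]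
    by_cases hs : (pre ++ v :: rest).sum ≤ total
    · rw [show passStep total (pre ++ v :: rest) pre.length = pre ++ v :: rest from by
        simp only [passStep, if_pos hs]]
      rw [pass_skip _ _ _ hs, decFirst_nonpos _ _ (by omega)]
    · have hstep : passStep total (pre ++ v :: rest) pre.length =
          if 1 < v then pre ++ (v - 1) :: rest else pre ++ v :: rest := by
        simp only [passStep, if_neg hs, getD_mid, set_mid]
      by_cases hv : 1 < v
      · rw [hstep, if_pos hv]
        have := ih (pre ++ [v - 1]) total
        simp only [List.length_append, List.length_cons, List.length_nil,
          List.append_assoc, List.cons_append, List.nil_append] at this ⊢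
        rw [show pre.length + 1 = pre.length + [(v-1)].length from rfl] at this ⊢
        simp only [List.length_cons, List.length_nil] at this ⊢
        rw [this]
        have hsum : (pre ++ (v - 1) :: rest).sum = (pre ++ v :: rest).sum - 1 := by
          simp [List.sum_append]; ring
        rw [hsum]
        simp only [decFirst, if_pos (show 1 < v ∧ 0 < (pre ++ v :: rest).sum - total by
          constructor; exact hv; omega)]
        simp
        ring_nf
      · rw [hstep, if_neg hv]
        have := ih (pre ++ [v]) total
        simp only [List.length_append, List.length_cons, List.length_nil,
          List.append_assoc, List.cons_append, List.nil_append] at this ⊢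
        rw [this]
        simp only [decFirst, if_neg (show ¬(1 < v ∧ 0 < (pre ++ v :: rest).sum - total) by
          intro h; exact hv h.1)]

theorem passA_eq (total : Int) (res : List Int) :
    passA total res = decFirst (res.sum - total) res := by
  have := pass_go res [] total
  simpa [passA, List.range_eq_range'] using this

theorem sum_decFirst_le (l : List Int) : ∀ k, (decFirst k l).sum ≤ l.sum := by
  induction l with
  | nil => intro k; simp [decFirst]
  | cons v rest ih =>
    intro k
    simp only [decFirst]
    split
    · have := ih (k - 1); simp only [List.sum_cons]; omega
    · have := ih k; simp only [List.sum_cons]; omega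

theorem sum_decFirst_lt (l : List Int) : ∀ k, 0 < k → (∃ v ∈ l, 1 < v) →
    (decFirst k l).sum < l.sum := by
  induction l with
  | nil => intro k _ h; simp at h
  | cons v rest ih =>
    intro k hk h
    simp only [decFirst]
    by_cases hv : 1 < v
    · rw [if_pos ⟨hv, hk⟩]
      have := sum_decFirst_le rest (k - 1)
      simp only [List.sum_cons]; omega
    · rw [if_neg (by omega : ¬(1 < v ∧ 0 < k))]
      have hrest : ∃ w ∈ rest, 1 < w := by
        rcases h with ⟨w, hw, hw1⟩
        rcases List.mem_cons.mp hw with rfl | hmem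
        · omega
        · exact ⟨w, hmem, hw1⟩
      have := ih k hk hrest
      simp only [List.sum_cons]; omega

-- A's while-loop
def loopA (total : Int) (res : List Int) : List Int :=
  if h : total < res.sum ∧ res.any (fun v => decide (1 < v)) = true then
    loopA total (passA total res)
  else res
termination_by (res.sum - total).toNat
decreasing_by
  have hex : ∃ v ∈ res, 1 < v := by simpa using h.2
  have := sum_decFirst_lt res (res.sum - total) (by omega) hex
  rw [passA_eq]
  omega

def shrink_to_total_py (values : List Int) (total : Int) : List Int :=
  if total ≤ 0 then List.replicate values.length 0
  else loopA total values

-- ===== PORT B =====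
def capOf (v : Int) : Int := if 1 < v then v - 1 else 0      -- v - 1 if v > 1 else 0

def capsOf (values : List Int) : List Int := values.map capOf

-- removed(r): amount removed after r complete rounds
def removedB (caps : List Int) (r : Int) : Int :=
  (caps.map (fun c => if c < r then c else r)).sum

def maxCaps (caps : List Int) : Int := caps.foldl max 0      -- max(caps, default=0); caps ≥ 0

-- binary search: greatest r with removed(r) <= budget
def bsearchR (caps : List Int) (budget lo hi : Int) : Int :=
  if h : lo < hi then
    if removedB caps ((lo + hi + 1) / 2) ≤ budget then
      bsearchR caps budget ((lo + hi + 1) / 2) hi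
    else
      bsearchR caps budget lo ((lo + hi + 1) / 2 - 1)
  else lo
termination_by (hi - lo).toNat
decreasing_by all_goals omega

-- the final zip loop, threading `rem`
def buildOut (rounds : Int) : List (Int × Int) → Int → List Int
  | [], _ => []
  | (v, c) :: rest, rem =>
    let take := if c < rounds then c else rounds
    if c > rounds ∧ rem > 0 then (v - (take + 1)) :: buildOut rounds rest (rem - 1)
    else (v - take) :: buildOut rounds rest rem

def shrink_to_total_py_alt (values : List Int) (total : Int) : List Int :=
  if total ≤ 0 then List.replicate values.length 0
  else
    let excess := values.sum - total
    if excess ≤ 0 then values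
    else
      let caps := capsOf values
      let budget := if excess ≤ caps.sum then excess else caps.sum
      let rounds := bsearchR caps budget 0 (maxCaps caps)
      buildOut rounds (values.zip caps) (budget - removedB caps rounds)

-- ===== PRECONDITION & SPEC =====
def Spec_shrink_to_total_py (values : List Int) (total : Int) (out : List Int) : Prop := out = shrink_to_total_py_alt values total
instance (values : List Int) (total : Int) (out : List Int) : Decidable (Spec_shrink_to_total_py values total out) := by unfold Spec_shrink_to_total_py; infer_instance

-- ===== CLAIM (what is proved, stated in full; the proofs are below) =====
def Claim_equal_shrink_to_total_py : Prop := ∀ (values : List Int) (total : Int), Dom_shrink_to_total_py values total → Spec_shrink_to_total_py values total (shrink_to_total_py values total)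

-- ===== LEMMAS AND PROOFS =====

theorem capOf_nonneg (v : Int) : 0 ≤ capOf v := by unfold capOf; split <;> omega

theorem capsOf_nonneg (vs : List Int) : ∀ c ∈ capsOf vs, 0 ≤ c := by
  intro c hc
  simp only [capsOf, List.mem_map] at hc
  rcases hc with ⟨v, _, rfl⟩
  exact capOf_nonneg v

theorem capsOf_cons (v : Int) (rest : List Int) :
    capsOf (v :: rest) = capOf v :: capsOf rest := rfl

theorem removedB_nil (r : Int) : removedB [] r = 0 := rfl

theorem removedB_cons (c : Int) (caps : List Int) (r : Int) :
    removedB (c :: caps) r = (if c < r then c else r) + removedB caps r := by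
  simp [removedB]

theorem removedB_mono (caps : List Int) (r s : Int) (h : r ≤ s) :
    removedB caps r ≤ removedB caps s := by
  induction caps with
  | nil => simp [removedB_nil]
  | cons c cs ih => rw [removedB_cons, removedB_cons]; split_ifs <;> omega

theorem removedB_nonneg (caps : List Int) (r : Int) (hn : ∀ c ∈ caps, 0 ≤ c) (hr : 0 ≤ r) :
    0 ≤ removedB caps r := by
  induction caps with
  | nil => simp [removedB_nil]
  | cons c cs ih =>
    rw [removedB_cons]
    have h1 := hn c (by simp)
    have h2 := ih (fun x hx => hn x (by simp [hx]))
    split_ifs <;> omega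

theorem removedB_zero (caps : List Int) (hn : ∀ c ∈ caps, 0 ≤ c) : removedB caps 0 = 0 := by
  induction caps with
  | nil => rfl
  | cons c cs ih =>
    rw [removedB_cons]
    have h1 := hn c (by simp)
    rw [if_neg (by omega), ih (fun x hx => hn x (by simp [hx]))]
    omega

theorem removedB_le_sum (caps : List Int) (r : Int) : removedB caps r ≤ caps.sum := by
  induction caps with
  | nil => simp [removedB_nil]
  | cons c cs ih => rw [removedB_cons]; simp only [List.sum_cons]; split_ifs <;> omega

theorem le_foldl_max (l : List Int) : ∀ a : Int, a ≤ l.foldl max a := by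
  induction l with
  | nil => intro a; simp
  | cons c cs ih =>
    intro a
    simp only [List.foldl_cons]
    calc a ≤ max a c := le_max_left a c
    _ ≤ cs.foldl max (max a c) := ih (max a c)

theorem mem_le_foldl_max (l : List Int) : ∀ (a c : Int), c ∈ l → c ≤ l.foldl max a := by
  induction l with
  | nil => intro a c h; simp at h
  | cons x xs ih =>
    intro a c h
    rcases List.mem_cons.mp h with rfl | hmem
    · calc c ≤ max a c := le_max_right a c
      _ ≤ xs.foldl max (max a c) := le_foldl_max xs (max a c)
    · exact ih (max a x) c hmem

theorem removedB_ge_max (caps : List Int) (r : Int) (hn : ∀ c ∈ caps, 0 ≤ c)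
    (hr : maxCaps caps ≤ r) : removedB caps r = caps.sum := by
  have hle : ∀ c ∈ caps, c ≤ r := fun c hc =>
    le_trans (mem_le_foldl_max caps 0 c hc) hr
  clear hr
  induction caps with
  | nil => simp [removedB_nil]
  | cons c cs ih =>
    rw [removedB_cons]
    have h1 := hle c (by simp)
    have := ih (fun x hx => hn x (by simp [hx])) (fun x hx => hle x (by simp [hx]))
    simp only [List.sum_cons]
    split_ifs <;> omega

-- characterization of the number of complete rounds
def IsR (caps : List Int) (D R : Int) : Prop :=
  0 ≤ R ∧ removedB caps R ≤ D ∧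
    (D < removedB caps (R + 1) ∨ removedB caps R = removedB caps (R + 1))

theorem bsearch_correct (caps : List Int) (budget : Int) (n : Nat) :
    ∀ lo hi : Int, (hi - lo).toNat ≤ n → 0 ≤ lo → lo ≤ hi →
    removedB caps lo ≤ budget →
    (budget < removedB caps (hi + 1) ∨ removedB caps hi = removedB caps (hi + 1)) →
    IsR caps budget (bsearchR caps budget lo hi) := by
  induction n with
  | zero =>
    intro lo hi hm h0 hle hlo hhi
    have : lo = hi := by omega
    subst this
    rw [bsearchR, dif_neg (by omega)]
    exact ⟨h0, hlo, hhi⟩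
  | succ n ih =>
    intro lo hi hm h0 hle hlo hhi
    rw [bsearchR]
    by_cases hlt : lo < hi
    · rw [dif_pos hlt]
      by_cases htest : removedB caps ((lo + hi + 1) / 2) ≤ budget
      · rw [if_pos htest]
        exact ih ((lo + hi + 1) / 2) hi (by omega) (by omega) (by omega) htest hhi
      · rw [if_neg htest]
        refine ih lo ((lo + hi + 1) / 2 - 1) (by omega) h0 (by omega) hlo ?_
        left
        have : (lo + hi + 1) / 2 - 1 + 1 = (lo + hi + 1) / 2 := by omega
        rw [this]; omega
    · rw [dif_neg hlt]
      have : lo = hi := by omega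
      subst this
      exact ⟨h0, hlo, hhi⟩

-- decrement-by-one of the eligible entries (one full round)
def dec1 (v : Int) : Int := if 1 < v then v - 1 else v

def dcap (c : Int) : Int := if 0 < c then c - 1 else c

theorem sum_decFirst_eq (l : List Int) : ∀ k, 0 ≤ k → k ≤ removedB (capsOf l) 1 →
    (decFirst k l).sum = l.sum - k := by
  induction l with
  | nil =>
    intro k h0 h1
    simp only [capsOf, List.map_nil, removedB_nil] at h1
    have : k = 0 := by omega
    subst this; simp [decFirst]
  | cons v rest ih =>
    intro k h0 h1
    rw [capsOf_cons, removedB_cons] at h1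
    have hterm : (if capOf v < 1 then capOf v else (1:Int)) = if 1 < v then 1 else 0 := by
      unfold capOf; split_ifs <;> omega
    rw [hterm] at h1
    have hrn : 0 ≤ removedB (capsOf rest) 1 :=
      removedB_nonneg _ _ (capsOf_nonneg rest) (by omega)
    simp only [decFirst]
    by_cases hv : 1 < v
    · rw [if_pos hv] at h1
      by_cases hk : 0 < k
      · rw [if_pos ⟨hv, hk⟩]
        have := ih (k - 1) (by omega) (by omega)
        simp only [List.sum_cons]; omega
      · have : k = 0 := by omega
        subst this
        rw [if_neg (by omega), decFirst_nonpos _ _ (by omega)]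
        omega
    · rw [if_neg hv] at h1
      rw [if_neg (by omega : ¬(1 < v ∧ 0 < k))]
      have := ih k h0 (by omega)
      simp only [List.sum_cons]; omega

theorem decFirst_all (l : List Int) : ∀ k, removedB (capsOf l) 1 ≤ k →
    decFirst k l = l.map dec1 := by
  induction l with
  | nil => intro k _; rfl
  | cons v rest ih =>
    intro k hk
    rw [capsOf_cons, removedB_cons] at hk
    have hterm : (if capOf v < 1 then capOf v else (1:Int)) = if 1 < v then 1 else 0 := by
      unfold capOf; split_ifs <;> omega
    rw [hterm] at hk
    have hrn : 0 ≤ removedB (capsOf rest) 1 :=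
      removedB_nonneg _ _ (capsOf_nonneg rest) (by omega)
    simp only [decFirst, List.map_cons]
    by_cases hv : 1 < v
    · rw [if_pos hv] at hk
      rw [if_pos ⟨hv, by omega⟩, ih (k - 1) (by omega)]
      simp [dec1, hv]
    · rw [if_neg hv] at hk
      rw [if_neg (fun h => hv h.1), ih k (by omega)]
      simp [dec1, hv]

theorem sum_map_dec1 (vs : List Int) :
    (vs.map dec1).sum = vs.sum - removedB (capsOf vs) 1 := by
  induction vs with
  | nil => simp [removedB_nil, capsOf]
  | cons v rest ih =>
    rw [capsOf_cons, removedB_cons]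
    simp only [List.map_cons, List.sum_cons]
    rw [ih]
    unfold dec1 capOf
    split_ifs <;> omega

theorem capsOf_map_dec1 (vs : List Int) :
    capsOf (vs.map dec1) = (capsOf vs).map dcap := by
  simp only [capsOf, List.map_map]
  congr 1
  funext v
  simp only [Function.comp_apply]
  unfold capOf dec1 dcap
  split_ifs <;> omega

theorem removedB_map_dcap (caps : List Int) (r : Int) (hn : ∀ c ∈ caps, 0 ≤ c) (hr : 0 ≤ r) :
    removedB (caps.map dcap) r = removedB caps (r + 1) - removedB caps 1 := by
  induction caps with
  | nil => simp [removedB_nil]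
  | cons c cs ih =>
    have h1 := hn c (by simp)
    rw [List.map_cons, removedB_cons, removedB_cons, removedB_cons,
      ih (fun x hx => hn x (by simp [hx]))]
    unfold dcap
    split_ifs <;> omega

theorem sum_map_dcap (caps : List Int) (hn : ∀ c ∈ caps, 0 ≤ c) :
    (caps.map dcap).sum = caps.sum - removedB caps 1 := by
  induction caps with
  | nil => simp [removedB_nil]
  | cons c cs ih =>
    have h1 := hn c (by simp)
    simp only [List.map_cons, List.sum_cons, removedB_cons]
    rw [ih (fun x hx => hn x (by simp [hx]))]
    unfold dcap
    split_ifs <;> omega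

theorem elig_pos (vs : List Int) (h : ∃ v ∈ vs, 1 < v) : 1 ≤ removedB (capsOf vs) 1 := by
  induction vs with
  | nil => simp at h
  | cons v rest ih =>
    rw [capsOf_cons, removedB_cons]
    have hrn : 0 ≤ removedB (capsOf rest) 1 :=
      removedB_nonneg _ _ (capsOf_nonneg rest) (by omega)
    rcases h with ⟨w, hw, hw1⟩
    rcases List.mem_cons.mp hw with rfl | hmem
    · have : capOf w = w - 1 := by unfold capOf; rw [if_pos hw1]
      rw [this, if_neg (by omega)]
      omega
    · have := ih ⟨w, hmem, hw1⟩
      unfold capOf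
      split_ifs <;> omega

theorem capsum_zero (vs : List Int) (h : ∀ v ∈ vs, ¬1 < v) : (capsOf vs).sum = 0 := by
  induction vs with
  | nil => simp [capsOf]
  | cons v rest ih =>
    rw [capsOf_cons]
    simp only [List.sum_cons]
    rw [show capOf v = 0 from by unfold capOf; rw [if_neg (h v (by simp))]]
    have := ih (fun x hx => h x (by simp [hx]))
    omega

theorem buildOut_id (vs : List Int) (R : Int) (hR : 0 ≤ R)
    (hf : removedB (capsOf vs) R = 0) : buildOut R (vs.zip (capsOf vs)) 0 = vs := by
  induction vs with
  | nil => rfl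
  | cons v rest ih =>
    rw [capsOf_cons, removedB_cons] at hf
    have h1 : 0 ≤ capOf v := capOf_nonneg v
    have h2 : 0 ≤ removedB (capsOf rest) 1 := removedB_nonneg _ _ (capsOf_nonneg rest) (by omega)
    have h3 : 0 ≤ removedB (capsOf rest) R := removedB_nonneg _ _ (capsOf_nonneg rest) hR
    have hterm : 0 ≤ (if capOf v < R then capOf v else R) := by split_ifs <;> omega
    rw [capsOf_cons]
    simp only [List.zip_cons_cons, buildOut]
    rw [if_neg (by omega : ¬(capOf v > R ∧ (0:Int) > 0))]
    have htake : (if capOf v < R then capOf v else R) = 0 := by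
      split_ifs at hf hterm ⊢ <;> omega
    rw [htake]
    have hrest : removedB (capsOf rest) R = 0 := by omega
    rw [ih hrest]
    simp

theorem buildOut_rounds_zero (vs : List Int) : ∀ k,
    buildOut 0 (vs.zip (capsOf vs)) k = decFirst k vs := by
  induction vs with
  | nil => intro k; rfl
  | cons v rest ih =>
    intro k
    have h1 : 0 ≤ capOf v := capOf_nonneg v
    rw [capsOf_cons]
    simp only [List.zip_cons_cons, buildOut, decFirst]
    have htake : (if capOf v < (0:Int) then capOf v else 0) = 0 := by
      rw [if_neg (by omega)]
    rw [htake]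
    have hcond : (capOf v > 0 ∧ k > 0) ↔ (1 < v ∧ 0 < k) := by
      unfold capOf; split_ifs <;> omega
    by_cases hc : 1 < v ∧ 0 < k
    · rw [if_pos (hcond.mpr hc), if_pos hc]
      rw [ih (k - 1)]
      norm_num
    · rw [if_neg (fun h => hc (hcond.mp h)), if_neg hc]
      rw [ih k]
      norm_num

theorem buildOut_shift (vs : List Int) (R : Int) (hR : 1 ≤ R) : ∀ rem,
    buildOut R (vs.zip (capsOf vs)) rem
      = buildOut (R - 1) ((vs.map dec1).zip (capsOf (vs.map dec1))) rem := by
  induction vs with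
  | nil => intro rem; rfl
  | cons v rest ih =>
    intro rem
    rw [capsOf_cons, List.map_cons, capsOf_cons]
    simp only [List.zip_cons_cons, buildOut]
    have h1 : 0 ≤ capOf v := capOf_nonneg v
    have hcond : (capOf v > R ∧ rem > 0) ↔ (capOf (dec1 v) > R - 1 ∧ rem > 0) := by
      unfold capOf dec1; split_ifs <;> omega
    have htake : ∀ b : Int, (if capOf (dec1 v) < R - 1 then capOf (dec1 v) else R - 1)
        = (if capOf v < R then capOf v else R) - (if 1 < v then 1 else 0) - b + b := by
      intro b; unfold capOf dec1; split_ifs <;> omega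
    have hval : dec1 v = v - (if 1 < v then 1 else 0) := by
      unfold dec1; split_ifs <;> omega
    by_cases hc : capOf v > R ∧ rem > 0
    · rw [if_pos hc, if_pos (hcond.mp hc)]
      rw [← ih (rem - 1)]
      congr 1
      rw [htake 0, hval]
      ring
    · rw [if_neg hc, if_neg (fun h => hc (hcond.mpr h))]
      rw [← ih rem]
      congr 1
      rw [htake 0, hval]
      ring

theorem loopA_main (n : Nat) : ∀ (vs : List Int) (total R : Int),
    (vs.sum - total).toNat ≤ n → 0 ≤ vs.sum - total →
    IsR (capsOf vs) (min (vs.sum - total) (capsOf vs).sum) R →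
    loopA total vs = buildOut R (vs.zip (capsOf vs))
      (min (vs.sum - total) (capsOf vs).sum - removedB (capsOf vs) R) := by
  induction n with
  | zero =>
    intro vs total R hm h0 hR
    have hex : vs.sum - total = 0 := by omega
    have hcs : 0 ≤ (capsOf vs).sum := by
      have := removedB_le_sum (capsOf vs) 0
      have := removedB_zero (capsOf vs) (capsOf_nonneg vs)
      have := removedB_nonneg (capsOf vs) 0 (capsOf_nonneg vs) le_rfl
      omega
    have hD : min (vs.sum - total) (capsOf vs).sum = 0 := by omega
    rw [hD] at hR ⊢
    obtain ⟨hR0, hRle, _⟩ := hR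
    have hfR0 : removedB (capsOf vs) R = 0 := by
      have := removedB_nonneg (capsOf vs) R (capsOf_nonneg vs) hR0
      omega
    rw [hfR0]
    rw [loopA, dif_neg (by omega : ¬(total < vs.sum ∧ vs.any (fun v => decide (1 < v)) = true))]
    norm_num
    exact (buildOut_id vs R hR0 hfR0).symm
  | succ n ih =>
    intro vs total R hm h0 hR
    set excess := vs.sum - total with hexdef
    set caps := capsOf vs with hcapsdef
    have hcn : ∀ c ∈ caps, 0 ≤ c := capsOf_nonneg vs
    have hcs : 0 ≤ caps.sum := by
      have := removedB_le_sum caps 0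
      have := removedB_zero caps hcn
      omega
    by_cases hc : total < vs.sum ∧ vs.any (fun v => decide (1 < v)) = true
    · have hex : ∃ v ∈ vs, 1 < v := by simpa using hc.2
      have hepos : 1 ≤ removedB caps 1 := elig_pos vs hex
      have hele : removedB caps 1 ≤ caps.sum := removedB_le_sum caps 1
      set e := removedB caps 1 with hedef
      obtain ⟨hR0, hRle, hRdisj⟩ := hR
      have hf0 : removedB caps 0 = 0 := removedB_zero caps hcn
      by_cases hfull : e ≤ excess
      · -- full pass: every eligible entry is decremented once
        have hD_ge_e : e ≤ min excess caps.sum := by omega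
        have hR1 : 1 ≤ R := by
          by_contra hR1
          have : R = 0 := by omega
          subst this
          rcases hRdisj with h | h
          · rw [show (0:Int) + 1 = 1 from rfl] at h; omega
          · rw [show (0:Int) + 1 = 1 from rfl] at h; omega
        have hstep : loopA total vs = loopA total (vs.map dec1) := by
          rw [loopA, dif_pos hc, passA_eq, decFirst_all vs excess (by rw [hedef, hcapsdef] at hfull; exact hfull)]
        rw [hstep]
        have hsum' : (vs.map dec1).sum = vs.sum - e := by
          rw [sum_map_dec1]
        have hcaps' : capsOf (vs.map dec1) = caps.map dcap := by
          rw [capsOf_map_dec1, hcapsdef]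
        have hcs' : (caps.map dcap).sum = caps.sum - e := sum_map_dcap caps hcn
        have hfr' : ∀ r : Int, 0 ≤ r → removedB (caps.map dcap) r = removedB caps (r + 1) - e :=
          fun r hr => removedB_map_dcap caps r hcn hr
        have hD' : min ((vs.map dec1).sum - total) (capsOf (vs.map dec1)).sum
            = min excess caps.sum - e := by
          rw [hsum', hcaps', hcs']; omega
        have hIsR' : IsR (capsOf (vs.map dec1))
            (min ((vs.map dec1).sum - total) (capsOf (vs.map dec1)).sum) (R - 1) := by
          rw [hD', hcaps']
          refine ⟨by omega, ?_, ?_⟩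
          · rw [hfr' (R - 1) (by omega)]
            have : R - 1 + 1 = R := by omega
            rw [this]; omega
          · rw [hfr' (R - 1) (by omega), hfr' (R - 1 + 1) (by omega)]
            have e1 : R - 1 + 1 = R := by omega
            rw [e1]
            rcases hRdisj with h | h
            · left; omega
            · right; omega
        have hrec := ih (vs.map dec1) total (R - 1)
          (by rw [hsum']; omega) (by rw [hsum']; omega) hIsR'
        rw [hrec]
        have hrem : min ((vs.map dec1).sum - total) (capsOf (vs.map dec1)).sum
            - removedB (capsOf (vs.map dec1)) (R - 1)
            = min excess caps.sum - removedB caps R := by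
          rw [hD', hcaps', hfr' (R - 1) (by omega)]
          have : R - 1 + 1 = R := by omega
          rw [this]; omega
        rw [hrem]
        exact (buildOut_shift vs R hR1 _).symm
      · -- partial pass: the sum reaches total mid-pass, loop exits
        have hexc : 0 < excess := by omega
        have hD : min excess caps.sum = excess := by omega
        have hRzero : R = 0 := by
          by_contra hne
          have h1R : 1 ≤ R := by omega
          have := removedB_mono caps 1 R h1R
          rw [hD] at hRle
          omega
        subst hRzero
        rw [hD, hf0]
        rw [loopA, dif_pos hc, passA_eq]
        have hsum2 : (decFirst excess vs).sum = total := by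
          rw [sum_decFirst_eq vs excess (by omega) (by rw [← hcapsdef]; omega)]
          omega
        rw [loopA, dif_neg (by rw [hsum2]; omega :
          ¬(total < (decFirst (vs.sum - total) vs).sum ∧ (decFirst (vs.sum - total) vs).any (fun v => decide (1 < v)) = true))]
        rw [buildOut_rounds_zero]
        congr 1
        omega
    · -- loop condition false: sum ≤ total or nothing eligible; both force D = 0
      rw [loopA, dif_neg hc]
      have hD : min excess caps.sum = 0 := by
        by_cases hs : total < vs.sum
        · have hne : ∀ v ∈ vs, ¬1 < v := by
            intro v hv hv1
            exact hc ⟨hs, by simp; exact ⟨v, hv, hv1⟩⟩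
          have := capsum_zero vs hne
          rw [hcapsdef]
          omega
        · omega
      rw [hD]
      obtain ⟨hR0, hRle, _⟩ := hR
      rw [hD] at hRle
      have hfR0 : removedB caps R = 0 := by
        have := removedB_nonneg caps R hcn hR0
        omega
      rw [hfR0]
      norm_num
      exact (buildOut_id vs R hR0 hfR0).symm

-- ===== VERDICT (by name: the statement is the Claim_ definition above) =====
theorem shrink_to_total_py_spec : Claim_equal_shrink_to_total_py := by
  intro values total _
  unfold Spec_shrink_to_total_py shrink_to_total_py shrink_to_total_py_alt
  by_cases ht : total ≤ 0
  · rw [if_pos ht, if_pos ht]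
  · rw [if_neg ht, if_neg ht]
    simp only
    by_cases hex : values.sum - total ≤ 0
    · rw [if_pos hex, loopA, dif_neg (by omega :
        ¬(total < values.sum ∧ values.any (fun v => decide (1 < v)) = true))]
    · rw [if_neg hex]
      have hcn : ∀ c ∈ capsOf values, 0 ≤ c := capsOf_nonneg values
      have hcs : 0 ≤ (capsOf values).sum := by
        have := removedB_le_sum (capsOf values) 0
        have := removedB_zero (capsOf values) hcn
        omega
      have hbmin : (if values.sum - total ≤ (capsOf values).sum then values.sum - total
          else (capsOf values).sum) = min (values.sum - total) (capsOf values).sum := by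
        rw [min_def]
      rw [hbmin]
      have hmax0 : (0:Int) ≤ maxCaps (capsOf values) := le_foldl_max (capsOf values) 0
      have hIsR := bsearch_correct (capsOf values) (min (values.sum - total) (capsOf values).sum)
        (maxCaps (capsOf values)).toNat 0 (maxCaps (capsOf values)) (by omega) le_rfl hmax0
        (by rw [removedB_zero (capsOf values) hcn]; omega)
        (by
          right
          rw [removedB_ge_max (capsOf values) (maxCaps (capsOf values)) hcn le_rfl,
            removedB_ge_max (capsOf values) (maxCaps (capsOf values) + 1) hcn (by omega)])
      exact loopA_main (values.sum - total).toNat values total _ (by omega) (by omega) hIsR
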